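-- pv_equiv track=rewrite | github.com/naye0ng/Algorithm | OnlineCodingTest/HyundaiCard/아이디추천.py | solution
-- ===== SOURCE A (Python) =====
-- def solution(registered_list, new_id):
--     if new_id not in registered_list :
--         return new_id
--
--     S, N = '', 0
--     for i in range(len(new_id)) :
--         if ord(new_id[i]) >= 97 and ord(new_id[i]) <= 122 :
--             S += new_id[i]
--         else :
--             N = int(new_id[i:])
--             break
--
--     return solution(registered_list, S+str(N+1))
-- ===== SOURCE B (Python) =====
-- def solution(registered_list, new_id):
--     registered = set(registered_list)
--     candidate = new_id
--     while candidate in registered: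
--         k = 0
--         while k < len(candidate) and 'a' <= candidate[k] <= 'z':
--             k += 1
--         n = int(candidate[k:]) if k < len(candidate) else 0
--         candidate = candidate[:k] + str(n + 1)
--     return candidate
-- ===== Notes on version B (the rewrite author's own statement) =====
-- stated objective: alternative
-- what changed: A's tail recursion (re-scanning the whole registered list each call) becomes an explicit while loop over a set built once, with an index-counting scan and slicing instead of A's string-building for/break loop.
import Mathlib
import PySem

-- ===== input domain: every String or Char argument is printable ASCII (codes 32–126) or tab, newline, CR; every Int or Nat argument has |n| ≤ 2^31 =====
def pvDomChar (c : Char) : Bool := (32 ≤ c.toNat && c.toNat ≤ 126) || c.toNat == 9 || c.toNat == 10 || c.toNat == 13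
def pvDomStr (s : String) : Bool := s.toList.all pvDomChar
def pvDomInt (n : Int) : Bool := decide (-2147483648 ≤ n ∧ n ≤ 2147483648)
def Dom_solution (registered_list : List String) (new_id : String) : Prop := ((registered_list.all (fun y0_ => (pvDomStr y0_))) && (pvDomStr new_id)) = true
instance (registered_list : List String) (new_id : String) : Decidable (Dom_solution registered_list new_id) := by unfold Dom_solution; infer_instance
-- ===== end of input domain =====

-- B replaces A's recursion by a while loop over a set of the registered ids (recursion → iteration, O(1) membership);
-- equivalence is about the RETURN value (neither mutates its arguments). Fuel `len+1` in both ports: each looping step's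
-- candidate is a distinct member of the list, so the fuel is never exhausted on inputs Python terminates on.

-- ===== PORT A =====
-- A's `for i in range(len(new_id))` building S and breaking at the first non-lowercase char, as structural
-- recursion over the remaining characters (which are exactly new_id[i:]).  `int(...)` raising ValueError is
-- `ofChars? = none`; those inputs are excluded by Pre_solution, the port uses `.getD 0` there.
def solParse (cs : List Char) (S : List Char) : List Char × Int :=
  match cs with
  | [] => (S, 0)
  | c :: rest =>
    if 97 ≤ c.toNat ∧ c.toNat ≤ 122 then solParse rest (S ++ [c])
    else (S, (PySem.Int.ofChars? (c :: rest)).getD 0)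

def solGo (registered_list : List String) (fuel : Nat) (new_id : String) : String :=
  match fuel with
  | 0 => new_id
  | fuel + 1 =>
    if new_id ∉ registered_list then new_id
    else
      let p := solParse new_id.toList []
      solGo registered_list fuel (String.mk (p.1 ++ PySem.Int.toChars (p.2 + 1)))

def solution (registered_list : List String) (new_id : String) : String :=
  solGo registered_list (registered_list.length + 1) new_id

-- ===== PORT B =====
-- B's inner `while k < len(candidate) and 'a' <= candidate[k] <= 'z': k += 1`: k counts the scanned prefix.
def altScan (cs : List Char) : Nat :=
  match cs with
  | [] => 0
  | c :: rest => if 'a' ≤ c ∧ c ≤ 'z' then altScan rest + 1 else 0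

-- B's outer `while candidate in registered` loop.
def altGo (registered : PySem.Set String) (fuel : Nat) (candidate : String) : String :=
  match fuel with
  | 0 => candidate
  | fuel + 1 =>
    if PySem.Set.contains registered candidate then
      let cs := candidate.toList
      let k := altScan cs
      let n : Int := if k < cs.length then (PySem.Int.ofChars? (List.drop k cs)).getD 0 else 0
      altGo registered fuel (String.mk (List.take k cs ++ PySem.Int.toChars (n + 1)))
    else candidate

def solution_alt (registered_list : List String) (new_id : String) : String :=
  altGo (PySem.Set.ofList registered_list) (registered_list.length + 1) new_id

-- ===== PRECONDITION & SPEC =====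
-- Pre_ excludes exactly the inputs where Python A raises ValueError: new_id is registered and the part after its
-- lowercase prefix is nonempty but is not a valid int literal (then `int(new_id[i:])` raises in A and in B alike).
def Pre_solution (registered_list : List String) (new_id : String) : Prop :=
  new_id ∈ registered_list →
    (new_id.toList.dropWhile (fun c => decide (97 ≤ c.toNat ∧ c.toNat ≤ 122)) = [] ∨
     (PySem.Int.ofChars? (new_id.toList.dropWhile (fun c => decide (97 ≤ c.toNat ∧ c.toNat ≤ 122)))).isSome)
instance (registered_list : List String) (new_id : String) : Decidable (Pre_solution registered_list new_id) := by
  unfold Pre_solution; infer_instance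

def pvWitness_solution : List String × String := (["abc", "abc1"], "abc")

def Spec_solution (registered_list : List String) (new_id : String) (out : String) : Prop := out = solution_alt registered_list new_id
instance (registered_list : List String) (new_id : String) (out : String) : Decidable (Spec_solution registered_list new_id out) := by unfold Spec_solution; infer_instance

-- ===== CLAIM (what is proved, stated in full; the proofs are below) =====
def Claim_equal_solution : Prop := ∀ (registered_list : List String) (new_id : String), Dom_solution registered_list new_id → Pre_solution registered_list new_id → Spec_solution registered_list new_id (solution registered_list new_id)

-- ===== LEMMAS AND PROOFS =====

-- A's character test `97 <= ord(c) <= 122` and B's `'a' <= c <= 'z'` agree.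
theorem low_char_eq (c : Char) : ('a' ≤ c ∧ c ≤ 'z') ↔ (97 ≤ c.toNat ∧ c.toNat ≤ 122) := by
  rw [Char.le_def, Char.le_def, UInt32.le_iff_toNat_le, UInt32.le_iff_toNat_le]
  simp only [Char.toNat, show ('a'.val).toNat = 97 from rfl, show ('z'.val).toNat = 122 from rfl]

-- A's scan-with-break computes B's (take k, parse of drop k) decomposition.
theorem solParse_eq (cs : List Char) (S : List Char) :
    solParse cs S =
      (S ++ cs.take (altScan cs),
       if altScan cs < cs.length then (PySem.Int.ofChars? (cs.drop (altScan cs))).getD 0 else 0) := by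
  induction cs generalizing S with
  | nil => simp [solParse, altScan]
  | cons c rest ih =>
    by_cases h : 97 ≤ c.toNat ∧ c.toNat ≤ 122
    · have h' : 'a' ≤ c ∧ c ≤ 'z' := (low_char_eq c).mpr h
      simp only [solParse, altScan, if_pos h, if_pos h', ih]
      simp
    · have h' : ¬ ('a' ≤ c ∧ c ≤ 'z') := fun hh => h ((low_char_eq c).mp hh)
      simp [solParse, altScan, if_neg h, if_neg h']

-- the two loops agree step by step (same fuel, same candidate)
theorem go_eq (L : List String) (fuel : Nat) (s : String) :
    solGo L fuel s = altGo (PySem.Set.ofList L) fuel s := by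
  induction fuel generalizing s with
  | zero => rfl
  | succ fuel ih =>
    have hmem : PySem.Set.contains (PySem.Set.ofList L) s = decide (s ∈ L) := by
      simp [PySem.Set.contains, PySem.Set.mem_ofList]
    by_cases h : s ∈ L
    · simp only [solGo, altGo, hmem, h, decide_true, if_true, not_true_eq_false, if_false,
        solParse_eq, ih]
      simp only [List.nil_append]
    · simp [solGo, altGo, h]

-- ===== VERDICT (by name: the statement is the Claim_ definition above) =====
theorem solution_spec : Claim_equal_solution := by
  intro L id _ _
  unfold Spec_solution solution solution_alt
  exact go_eq L (L.length + 1) id
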